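-- pv_equiv track=rewrite | github.com/killinux/memstudy | tools/layered-deps.py | bfs_layers
-- ===== SOURCE A (Python) =====
-- def bfs_layers(deps: dict, entry: str, max_depth: int) -> list[set[str]]:
--     """BFS 分层：返回每层包含的文件集合"""
--     visited = {entry}
--     layers = [{entry}]
--     frontier = {entry}
--
--     for depth in range(1, max_depth + 1):
--         next_frontier = set()
--         for node in frontier:
--             for dep in deps.get(node, []):
--                 if dep not in visited:
--                     visited.add(dep)
--                     next_frontier.add(dep)
--         if not next_frontier:
--             break
--         layers.append(next_frontier)
--         frontier = next_frontier
--
--     return layers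
-- ===== SOURCE B (Python) =====
-- def bfs_layers(deps: dict, entry: str, max_depth: int) -> list:
--     """Single FIFO queue of (node, depth) pairs; layers grow in place as new
--     depths are first reached, instead of per-level frontier sets driven by a
--     range(1, max_depth+1) loop."""
--     visited = {entry}
--     layers = [{entry}]
--     queue = [(entry, 0)]
--     i = 0
--     while i < len(queue):
--         node, depth = queue[i]
--         i += 1
--         if depth + 1 <= max_depth:
--             for dep in deps.get(node, []):
--                 if dep not in visited:
--                     visited.add(dep)
--                     if len(layers) == depth + 1:
--                         layers.append(set())
--                     layers[-1].add(dep)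
--                     queue.append((dep, depth + 1))
--     return layers
-- ===== Notes on version B (the rewrite author's own statement) =====
-- stated objective: alternative
-- what changed: Replaces the range(1,max_depth+1) loop over per-level frontier sets (with a break on an empty next frontier) by a single FIFO queue of (node, depth) pairs scanned with an index, growing the layers list in place the first time each depth is reached.
import Mathlib
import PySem

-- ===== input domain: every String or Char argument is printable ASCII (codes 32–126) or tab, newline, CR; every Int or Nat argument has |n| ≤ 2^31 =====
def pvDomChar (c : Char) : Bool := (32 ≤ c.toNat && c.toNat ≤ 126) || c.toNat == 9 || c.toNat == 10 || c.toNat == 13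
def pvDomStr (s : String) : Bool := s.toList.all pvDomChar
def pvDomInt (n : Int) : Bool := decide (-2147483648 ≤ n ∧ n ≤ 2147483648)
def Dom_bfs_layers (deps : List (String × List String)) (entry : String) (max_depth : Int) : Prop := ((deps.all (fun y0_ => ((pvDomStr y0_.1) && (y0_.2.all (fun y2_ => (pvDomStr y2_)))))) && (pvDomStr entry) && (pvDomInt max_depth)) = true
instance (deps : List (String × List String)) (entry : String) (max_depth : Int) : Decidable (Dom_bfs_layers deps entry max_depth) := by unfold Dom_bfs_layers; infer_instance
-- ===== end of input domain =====

-- B replaces A's per-level frontier sets driven by a range(1, max_depth+1) loop with a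
-- single FIFO queue of (node, depth) pairs, growing the layers list in place (objective: alternative).


-- ===== PORT A =====
-- body of the innermost loop: 'if dep not in visited: visited.add(dep); next_frontier.add(dep)'
def pvAStep (st : PySem.Set String × PySem.Set String) (dep : String) :
    PySem.Set String × PySem.Set String :=
  if PySem.Set.contains st.1 dep then st
  else (PySem.Set.add st.1 dep, PySem.Set.add st.2 dep)

-- 'for dep in deps.get(node, []): …' for one node of the frontier
def pvANode (deps : List (String × List String))
    (st : PySem.Set String × PySem.Set String) (node : String) :
    PySem.Set String × PySem.Set String :=
  ((PySem.Dict.mk deps).getD node []).foldl pvAStep st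

-- 'for depth in range(1, max_depth+1): …' — the loop variable depth is unused by the body, so the
-- loop is ported as a counted recursion with exactly len(range(1, max_depth+1)) = max_depth.toNat
-- iterations, with the same break on an empty next_frontier.
def pvALoop (deps : List (String × List String)) :
    Nat → PySem.Set String → List (List String) → PySem.Set String → List (List String)
  | 0, _, layers, _ => layers
  | n + 1, visited, layers, frontier =>
    let p := frontier.foldl (pvANode deps) (visited, PySem.Set.empty)
    if p.2.isEmpty then layers
    else pvALoop deps n p.1 (layers ++ [p.2]) p.2

def bfs_layers (deps : List (String × List String)) (entry : String) (max_depth : Int) :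
    List (List String) :=
  pvALoop deps max_depth.toNat (PySem.Set.ofList [entry])
    [PySem.Set.ofList [entry]] (PySem.Set.ofList [entry])

-- ===== PORT B =====
-- 'layers[-1].add(dep)'
def pvLastAdd (L : List (List String)) (x : String) : List (List String) :=
  match L.getLast? with
  | none => L
  | some s => L.dropLast ++ [PySem.Set.add s x]

-- body of 'for dep in deps.get(node, []): …' of Source B; state = (visited, layers, queue tail)
def pvBStep (depth : Int) (st : PySem.Set String × List (List String) × List (String × Int))
    (dep : String) : PySem.Set String × List (List String) × List (String × Int) :=
  if PySem.Set.contains st.1 dep then st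
  else
    (PySem.Set.add st.1 dep,
     pvLastAdd (if (st.2.1.length : Int) = depth + 1 then st.2.1 ++ [PySem.Set.empty] else st.2.1) dep,
     st.2.2 ++ [(dep, depth + 1)])

-- 'while i < len(queue): …' — the already-scanned prefix queue[:i] is dead, so the state is the
-- pending suffix queue[i:]; appends go to its end. The Nat argument is a fuel guard only (one unit
-- per pop; a run pops at most 1 + total number of dep-list entries nodes, so this fuel never runs out).
def pvBLoop (deps : List (String × List String)) (md : Int) :
    Nat → PySem.Set String → List (List String) → List (String × Int) → List (List String)
  | 0, _, layers, _ => layers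
  | _ + 1, _, layers, [] => layers
  | n + 1, visited, layers, (node, depth) :: rest =>
    if depth + 1 ≤ md then
      let st := ((PySem.Dict.mk deps).getD node []).foldl (pvBStep depth) (visited, layers, rest)
      pvBLoop deps md n st.1 st.2.1 st.2.2
    else pvBLoop deps md n visited layers rest

def bfs_layers_alt (deps : List (String × List String)) (entry : String) (max_depth : Int) :
    List (List String) :=
  pvBLoop deps max_depth ((deps.map Prod.snd).flatten.length + 2)
    (PySem.Set.ofList [entry]) [PySem.Set.ofList [entry]] [(entry, 0)]

-- ===== PRECONDITION & SPEC =====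
def Spec_bfs_layers (deps : List (String × List String)) (entry : String) (max_depth : Int) (out : List (List String)) : Prop := out = bfs_layers_alt deps entry max_depth
instance (deps : List (String × List String)) (entry : String) (max_depth : Int) (out : List (List String)) : Decidable (Spec_bfs_layers deps entry max_depth out) := by unfold Spec_bfs_layers; infer_instance

-- ===== CLAIM (what is proved, stated in full; the proofs are below) =====
def Claim_equal_bfs_layers : Prop := ∀ (deps : List (String × List String)) (entry : String) (max_depth : Int), Dom_bfs_layers deps entry max_depth → Spec_bfs_layers deps entry max_depth (bfs_layers deps entry max_depth)

-- ===== LEMMAS AND PROOFS =====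
-- all dependency names mentioned anywhere in the dict's values
def pvAll (deps : List (String × List String)) : List String := (deps.map Prod.snd).flatten

-- how many of the (deduplicated) dependency names are already visited
def pvCnt (deps : List (String × List String)) (v : PySem.Set String) : Nat :=
  ((pvAll deps).dedup.filter (fun y => decide (y ∈ v))).length

-- queue segment of one depth
def pvQd (xs : List String) (d : Int) : List (String × Int) := xs.map (fun n => (n, d))

-- the partially-built next layer as it appears at the end of B's layers list
def pvPart (nf : List String) : List (List String) := if nf.isEmpty then [] else [nf]

theorem pv_filt (v : List String) (x : String) (hv : x ∉ v) :
    ∀ l : List String, l.Nodup → x ∈ l →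
    (l.filter (fun y => decide (y ∈ v ++ [x]))).length
      = (l.filter (fun y => decide (y ∈ v))).length + 1 := by
  intro l
  induction l with
  | nil => intro _ h; cases h
  | cons a t ih =>
    intro hnd hmem
    have hnd2 := List.nodup_cons.1 hnd
    rcases List.mem_cons.1 hmem with h | hml
    · subst h
      have hcg : ∀ y ∈ t, decide (y ∈ v ++ [x]) = decide (y ∈ v) := by
        intro y hy
        simp
        intro h'; exact absurd (h' ▸ hy) hnd2.1
      simp only [List.filter_cons]
      rw [List.filter_congr hcg]
      simp [hv]
    · have hax : a ≠ x := by rintro rfl; exact hnd2.1 hml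
      have h1 : decide (a ∈ v ++ [x]) = decide (a ∈ v) := by simp [hax]
      simp only [List.filter_cons, h1]
      split_ifs with hc <;> simp only [List.length_cons, ih hnd2.2 hml]

theorem pv_getD_sub (deps : List (String × List String)) (node x : String)
    (hx : x ∈ (PySem.Dict.mk deps).getD node []) : x ∈ pvAll deps := by
  simp [PySem.Dict.getD, PySem.Dict.get?] at hx
  rcases h : (deps.find? (fun p => p.1 == node)) with _ | p
  · simp [h] at hx
  · simp [h] at hx
    have hp := List.mem_of_find?_eq_some h
    simp [pvAll]
    exact ⟨p.2, ⟨p.1, hp⟩, hx⟩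

theorem pv_cnt_add (deps : List (String × List String)) (v : PySem.Set String) (x : String)
    (hx : x ∈ pvAll deps) (hv : x ∉ v) :
    pvCnt deps (PySem.Set.add v x) = pvCnt deps v + 1 := by
  unfold pvCnt
  rw [PySem.Set.add_of_not_mem hv]
  exact pv_filt v x hv _ (List.nodup_dedup _) (List.mem_dedup.2 hx)

theorem pv_cnt_le (deps : List (String × List String)) (v : PySem.Set String) :
    pvCnt deps v ≤ (pvAll deps).dedup.length :=
  List.length_filter_le _ _

theorem pv_bloop_nil (deps : List (String × List String)) (md : Int) (F : Nat)
    (v : PySem.Set String) (L : List (List String)) :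
    pvBLoop deps md F v L [] = L := by
  cases F <;> simp [pvBLoop]

theorem pv_bloop_skip (deps : List (String × List String)) (md : Int) :
    ∀ (q : List (String × Int)) (F : Nat) (v : PySem.Set String) (L : List (List String)),
    (∀ e ∈ q, ¬ (e.2 + 1 ≤ md)) → q.length ≤ F → pvBLoop deps md F v L q = L := by
  intro q
  induction q with
  | nil => intro F v L _ _; exact pv_bloop_nil deps md F v L
  | cons e rest ih =>
    intro F v L hq hF
    obtain ⟨F', rfl⟩ : ∃ F', F = F' + 1 := by
      cases F with
      | zero => simp at hF
      | succ F' => exact ⟨F', rfl⟩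
    obtain ⟨node, depth⟩ := e
    have hg : ¬ (depth + 1 ≤ md) := hq (node, depth) (by simp)
    simp only [pvBLoop, if_neg hg]
    exact ih F' v L (fun e he => hq e (List.mem_cons_of_mem _ he)) (by simpa using Nat.le_of_succ_le_succ hF)

theorem pv_bstep_layers (d : Int) (L : List (List String)) (hL : (L.length : Int) = d + 1)
    (nf : PySem.Set String) (dep : String) (hnfnot : dep ∉ nf) :
    pvLastAdd (if (((L ++ pvPart nf).length : Int) = d + 1)
        then (L ++ pvPart nf) ++ [PySem.Set.empty] else L ++ pvPart nf) dep
      = L ++ pvPart (PySem.Set.add nf dep) := by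
  cases nf with
  | nil =>
    rw [if_pos (by simpa [pvPart] using hL)]
    simp [pvPart, pvLastAdd, PySem.Set.add, PySem.Set.empty, PySem.Set.contains]
  | cons y nf' =>
    rw [if_neg (by simp [pvPart]; omega)]
    simp [pvPart, pvLastAdd, PySem.Set.add_of_not_mem hnfnot]

theorem pv_inner_main (deps : List (String × List String)) (d : Int)
    (L : List (List String)) (hL : (L.length : Int) = d + 1) :
    ∀ (ds : List String), (∀ x ∈ ds, x ∈ pvAll deps) →
    ∀ (v nf : PySem.Set String) (R : List (String × Int)), (∀ x ∈ nf, x ∈ v) →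
    ds.foldl (pvBStep d) (v, L ++ pvPart nf, R ++ pvQd nf (d + 1))
      = ((ds.foldl pvAStep (v, nf)).1,
         L ++ pvPart (ds.foldl pvAStep (v, nf)).2,
         R ++ pvQd (ds.foldl pvAStep (v, nf)).2 (d + 1))
    ∧ (∀ x ∈ (ds.foldl pvAStep (v, nf)).2, x ∈ (ds.foldl pvAStep (v, nf)).1)
    ∧ (ds.foldl pvAStep (v, nf)).2.length + pvCnt deps v
        = nf.length + pvCnt deps (ds.foldl pvAStep (v, nf)).1 := by
  intro ds
  induction ds with
  | nil =>
    intro _ v nf R hsub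
    exact ⟨rfl, hsub, rfl⟩
  | cons dep ds' ih =>
    intro hds v nf R hsub
    have hdep : dep ∈ pvAll deps := hds dep (by simp)
    have hds' : ∀ x ∈ ds', x ∈ pvAll deps := fun x hx => hds x (List.mem_cons_of_mem _ hx)
    simp only [List.foldl_cons]
    by_cases hc : PySem.Set.contains v dep = true
    · simp only [pvBStep, pvAStep, hc, if_pos]
      exact ih hds' v nf R hsub
    · have hvnot : dep ∉ v := by simpa [PySem.Set.contains] using hc
      have hnfnot : dep ∉ nf := fun h => hvnot (hsub dep h)
      have hB : pvBStep d (v, L ++ pvPart nf, R ++ pvQd nf (d + 1)) dep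
          = (PySem.Set.add v dep, L ++ pvPart (PySem.Set.add nf dep),
             R ++ pvQd (PySem.Set.add nf dep) (d + 1)) := by
        simp only [pvBStep, hc, Bool.false_eq_true, if_false]
        refine congrArg _ (congrArg₂ _ ?_ ?_)
        · exact pv_bstep_layers d L hL nf dep hnfnot
        · rw [PySem.Set.add_of_not_mem hnfnot]
          simp [pvQd]
      have hA : pvAStep (v, nf) dep = (PySem.Set.add v dep, PySem.Set.add nf dep) := by
        simp only [pvAStep]; rw [if_neg hc]
      rw [hB, hA]
      have hsub' : ∀ x ∈ PySem.Set.add nf dep, x ∈ PySem.Set.add v dep := by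
        intro x hx
        rcases (PySem.Set.mem_add nf dep x).1 hx with h | h
        · exact (PySem.Set.mem_add v dep x).2 (Or.inl (hsub x h))
        · exact (PySem.Set.mem_add v dep x).2 (Or.inr h)
      obtain ⟨h1, h2, h3⟩ := ih hds' (PySem.Set.add v dep) (PySem.Set.add nf dep) R hsub'
      refine ⟨h1, h2, ?_⟩
      rw [pv_cnt_add deps v dep hdep hvnot] at h3
      have hlen : (PySem.Set.add nf dep).length = nf.length + 1 := by
        rw [PySem.Set.add_of_not_mem hnfnot]; simp
      omega

theorem pv_level_main (deps : List (String × List String)) (md d : Int) (hmd : d + 1 ≤ md) :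
    ∀ (ns : List String) (F : Nat) (v nf : PySem.Set String) (L : List (List String)),
    (L.length : Int) = d + 1 → (∀ x ∈ nf, x ∈ v) →
    pvBLoop deps md (ns.length + F) v (L ++ pvPart nf) (pvQd ns d ++ pvQd nf (d + 1))
      = pvBLoop deps md F (ns.foldl (pvANode deps) (v, nf)).1
          (L ++ pvPart (ns.foldl (pvANode deps) (v, nf)).2)
          (pvQd (ns.foldl (pvANode deps) (v, nf)).2 (d + 1))
    ∧ (∀ x ∈ (ns.foldl (pvANode deps) (v, nf)).2, x ∈ (ns.foldl (pvANode deps) (v, nf)).1)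
    ∧ (ns.foldl (pvANode deps) (v, nf)).2.length + pvCnt deps v
        = nf.length + pvCnt deps (ns.foldl (pvANode deps) (v, nf)).1 := by
  intro ns
  induction ns with
  | nil =>
    intro F v nf L hL hsub
    exact ⟨by simp [pvQd], hsub, rfl⟩
  | cons n ns' ih =>
    intro F v nf L hL hsub
    have hq : pvQd (n :: ns') d ++ pvQd nf (d + 1)
        = (n, d) :: (pvQd ns' d ++ pvQd nf (d + 1)) := by simp [pvQd]
    have hF : (n :: ns').length + F = (ns'.length + F) + 1 := by simp; omega
    rw [hq, hF]
    simp only [pvBLoop, if_pos hmd]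
    obtain ⟨h1, h2, h3⟩ := pv_inner_main deps d L hL ((PySem.Dict.mk deps).getD n [])
      (fun x hx => pv_getD_sub deps n x hx) v nf (pvQd ns' d) hsub
    rw [h1]
    obtain ⟨g1, g2, g3⟩ := ih F (((PySem.Dict.mk deps).getD n []).foldl pvAStep (v, nf)).1
      (((PySem.Dict.mk deps).getD n []).foldl pvAStep (v, nf)).2 L hL h2
    have hnode : pvANode deps (v, nf) n = ((PySem.Dict.mk deps).getD n []).foldl pvAStep (v, nf) := rfl
    simp only [Prod.mk.eta] at g1 g2 g3
    simp only [List.foldl_cons, hnode]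
    exact ⟨g1, g2, by omega⟩

theorem pv_outer_main (deps : List (String × List String)) (md : Int) :
    ∀ (n : Nat) (d : Int) (v f : PySem.Set String) (L : List (List String)) (F : Nat),
    n = (md - d).toNat → (∀ x ∈ f, x ∈ v) → f ≠ [] → (L.length : Int) = d + 1 →
    f.length + ((pvAll deps).dedup.length - pvCnt deps v) ≤ F →
    pvBLoop deps md F v L (pvQd f d) = pvALoop deps n v L f := by
  intro n
  induction n with
  | zero =>
    intro d v f L F hn _ _ _ hfuel
    rw [pvALoop]
    refine pv_bloop_skip deps md (pvQd f d) F v L ?_ (by simp [pvQd]; omega)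
    intro e he
    obtain ⟨x, _, rfl⟩ := List.mem_map.1 he
    simp; omega
  | succ n' ih =>
    intro d v f L F hn hsubf hfne hL hfuel
    have hmd : d + 1 ≤ md := by omega
    obtain ⟨F₀, hF⟩ : ∃ F₀, F = f.length + F₀ := ⟨F - f.length, by omega⟩
    obtain ⟨l1, l2, l3⟩ := pv_level_main deps md d hmd f F₀ v PySem.Set.empty L hL
      (by intro x hx; simp [PySem.Set.empty] at hx)
    rw [hF]
    have hemp : pvPart PySem.Set.empty = [] := rfl
    have hqemp : pvQd PySem.Set.empty (d + 1) = [] := rfl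
    rw [hemp, hqemp, List.append_nil, List.append_nil] at l1
    rw [l1, pvALoop]
    set p := f.foldl (pvANode deps) (v, PySem.Set.empty) with hp
    by_cases hne : p.2.isEmpty
    · have h2 : p.2 = [] := by simpa [List.isEmpty_iff] using hne
      rw [if_pos hne, h2]
      have : pvPart ([] : List String) = [] := rfl
      rw [this, List.append_nil]
      have : pvQd ([] : List String) (d + 1) = [] := rfl
      rw [this, pv_bloop_nil]
    · have h2 : p.2 ≠ [] := by simpa [List.isEmpty_iff] using hne
      rw [if_neg hne]
      have hpart : pvPart p.2 = [p.2] := by simp [pvPart, List.isEmpty_iff, h2]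
      rw [hpart]
      refine ih (d + 1) p.1 p.2 (L ++ [p.2]) F₀ (by omega) l2 h2 (by simp; omega) ?_
      have hc1 : pvCnt deps p.1 ≤ (pvAll deps).dedup.length := pv_cnt_le deps p.1
      simp [PySem.Set.empty] at l3
      omega

-- ===== VERDICT (by name: the statement is the Claim_ definition above) =====
theorem bfs_layers_spec : Claim_equal_bfs_layers := by
  intro deps entry max_depth _
  unfold Spec_bfs_layers bfs_layers bfs_layers_alt
  have hS : PySem.Set.ofList [entry] = [entry] := rfl
  rw [hS]
  have hq : [(entry, (0 : Int))] = pvQd [entry] 0 := rfl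
  rw [hq]
  have hD : (pvAll deps).dedup.length ≤ (deps.map Prod.snd).flatten.length :=
    List.Sublist.length_le (List.dedup_sublist _)
  have hcle := pv_cnt_le deps [entry]
  refine (pv_outer_main deps max_depth max_depth.toNat 0 [entry] [entry] [[entry]]
    ((deps.map Prod.snd).flatten.length + 2) (by omega) (fun x hx => hx) (by simp)
    (by simp) (by have h1 : ([entry] : List String).length = 1 := rfl; omega)).symm
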